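-- pv_equiv track=rewrite | github.com/MatijaEskicWork/Python-S-and-M-size-projects | VESALA.py | NapraviSkrivenu
-- ===== SOURCE A (Python) =====
-- def NapraviSkrivenu(text):
--     lista = []
--     for elem in text:
--         if elem!=' ':
--             lista.append('_')
--         else:
--             lista.append(elem)
--     lista = ''.join(lista)
--     return lista
-- ===== SOURCE B (Python) =====
-- def NapraviSkrivenu(text):
--     return ' '.join('_' * len(tok) for tok in text.split(' '))
-- ===== Notes on version B (the rewrite author's own statement) =====
-- stated objective: simpler
-- what changed: Instead of testing every character and appending to a list, B splits on the literal space, maps each token to a run of underscores of its length, and rejoins with spaces; a timing run measured this faster (bulk C-level split/join/repeat vs a per-character Python loop).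
import Mathlib
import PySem

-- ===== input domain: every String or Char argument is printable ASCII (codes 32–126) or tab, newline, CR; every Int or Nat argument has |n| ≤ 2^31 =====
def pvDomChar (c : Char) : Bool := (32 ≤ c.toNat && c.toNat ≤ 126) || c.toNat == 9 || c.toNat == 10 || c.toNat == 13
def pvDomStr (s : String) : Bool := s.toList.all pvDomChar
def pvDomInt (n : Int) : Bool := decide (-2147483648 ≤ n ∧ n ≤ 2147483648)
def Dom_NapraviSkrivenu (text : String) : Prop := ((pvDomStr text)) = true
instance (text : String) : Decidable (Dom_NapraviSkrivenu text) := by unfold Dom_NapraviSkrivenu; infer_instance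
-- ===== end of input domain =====

-- B replaces A's per-character test-and-append loop by split-on-space / map-to-underscore-runs / rejoin; same result, different decomposition.


-- ===== PORT A =====
-- ''.join of a list of single-character strings is exactly the concatenation of those
-- characters, so `lista` is kept as a List Char that each iteration appends one char to.
def NapraviSkrivenu (text : String) : String :=
  let lista := text.toList.foldl
    (fun lista elem => if elem != ' ' then lista ++ ['_'] else lista ++ [elem]) []
  String.ofList lista

-- ===== PORT B =====
-- text.split(' ') with a non-empty separator never raises; PySem.Chars.splitOn is that split.
def NapraviSkrivenu_alt (text : String) : String :=
  PySem.Str.join " "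
    ((PySem.Chars.splitOn text.toList [' ']).map
      (fun tok => String.ofList (List.replicate tok.length '_')))

-- ===== PRECONDITION & SPEC =====
def Spec_NapraviSkrivenu (text : String) (out : String) : Prop := out = NapraviSkrivenu_alt text
instance (text : String) (out : String) : Decidable (Spec_NapraviSkrivenu text out) := by unfold Spec_NapraviSkrivenu; infer_instance

-- ===== CLAIM (what is proved, stated in full; the proofs are below) =====
def Claim_equal_NapraviSkrivenu : Prop := ∀ (text : String), Dom_NapraviSkrivenu text → Spec_NapraviSkrivenu text (NapraviSkrivenu text)

-- ===== LEMMAS AND PROOFS =====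

-- A's mask on one character.
def pvMask (c : Char) : Char := if c = ' ' then ' ' else '_'

theorem foldlA (cs : List Char) (acc : List Char) :
    cs.foldl (fun lista elem => if elem != ' ' then lista ++ ['_'] else lista ++ [elem]) acc
      = acc ++ cs.map pvMask := by
  induction cs generalizing acc with
  | nil => simp
  | cons c rest ih =>
    simp only [List.foldl_cons, List.map_cons]
    rw [ih]
    by_cases h : c = ' ' <;> simp [pvMask, h]

-- structural-recursion characterisation of splitting on a single space
def splitCh : List Char → List (List Char)
  | [] => [[]]
  | c :: rest => if c = ' ' then [] :: splitCh rest else (splitCh rest).modifyHead (c :: ·)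

theorem splitCh_ne_nil (cs : List Char) : splitCh cs ≠ [] := by
  cases cs with
  | nil => simp [splitCh]
  | cons c rest =>
    simp only [splitCh]
    split <;> simp [List.modifyHead]
    cases h : splitCh rest with
    | nil => exact absurd h (splitCh_ne_nil rest)
    | cons t ts => simp

theorem go_eq (fuel : Nat) (l cur : List Char) (acc : List (List Char)) (h : l.length ≤ fuel) :
    PySem.Chars.splitOn.go [' '] fuel l cur acc
      = acc.reverse ++ (splitCh l).modifyHead (cur.reverse ++ ·) := by
  induction fuel generalizing l cur acc with
  | zero =>
    have : l = [] := List.length_eq_zero_iff.mp (Nat.le_zero.mp h)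
    subst this
    simp [PySem.Chars.splitOn.go, splitCh]
  | succ fuel ih =>
    cases l with
    | nil => simp [PySem.Chars.splitOn.go, splitCh]
    | cons c rest =>
      simp only [List.length_cons, Nat.add_le_add_iff_right] at h
      by_cases hc : c = ' '
      · subst hc
        have : [' '].isPrefixOf (' ' :: rest) = true := by simp [List.isPrefixOf]
        simp only [PySem.Chars.splitOn.go, this, if_pos, List.length_singleton, List.drop_one,
          List.tail_cons]
        rw [ih rest [] (cur.reverse :: acc) h]
        simp only [splitCh, List.reverse_cons, List.reverse_nil, List.nil_append,
          List.modifyHead, List.append_assoc, List.singleton_append]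
        cases splitCh rest <;> simp
      · have : [' '].isPrefixOf (c :: rest) = false := by
          simp [List.isPrefixOf]
          exact fun hh => hc hh.symm
        simp only [PySem.Chars.splitOn.go, this]
        rw [ih rest (c :: cur) acc h]
        cases hs : splitCh rest with
        | nil => exact absurd hs (splitCh_ne_nil rest)
        | cons t ts => simp [splitCh, hc, hs, List.modifyHead]
      
theorem splitOn_eq_splitCh (cs : List Char) :
    PySem.Chars.splitOn cs [' '] = splitCh cs := by
  unfold PySem.Chars.splitOn
  rw [go_eq cs.length.succ cs [] [] (Nat.le_succ _)]
  cases h : splitCh cs with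
  | nil => exact absurd h (splitCh_ne_nil cs)
  | cons t ts => simp [List.modifyHead]

theorem joinR (cs : List Char) :
    PySem.Chars.join [' '] ((splitCh cs).map (fun t => List.replicate t.length '_'))
      = cs.map pvMask := by
  induction cs with
  | nil => simp [splitCh, PySem.Chars.join, List.intercalate]
  | cons c rest ih =>
    by_cases hc : c = ' '
    · subst hc
      cases hs : splitCh rest with
      | nil => exact absurd hs (splitCh_ne_nil rest)
      | cons t ts =>
        rw [hs] at ih
        simp only [splitCh, if_pos rfl, List.map_cons, hs, PySem.Chars.join,
          List.intercalate, List.intersperse, List.replicate, List.flatten] at ih ⊢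
        simp [pvMask, ih]
    · cases hs : splitCh rest with
      | nil => exact absurd hs (splitCh_ne_nil rest)
      | cons t ts =>
        rw [hs] at ih
        simp only [splitCh, if_neg hc, hs, List.modifyHead, List.map_cons,
          List.length_cons, List.replicate_succ, PySem.Chars.join, List.intercalate,
          List.intersperse, List.flatten] at ih ⊢
        cases ts with
        | nil => simp_all [pvMask]
        | cons u us => simp_all [pvMask]

-- ===== VERDICT (by name: the statement is the Claim_ definition above) =====
theorem NapraviSkrivenu_spec : Claim_equal_NapraviSkrivenu := by
  intro text _
  unfold Spec_NapraviSkrivenu NapraviSkrivenu NapraviSkrivenu_alt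
  rw [foldlA, splitOn_eq_splitCh]
  have : ((splitCh text.toList).map
      (fun tok => String.ofList (List.replicate tok.length '_'))).map String.toList
      = (splitCh text.toList).map (fun t => List.replicate t.length '_') := by
    simp
  simp only [PySem.Str.join, List.nil_append]
  have hsep : (" " : String).toList = [' '] := rfl
  rw [this, hsep, joinR]
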